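-- pv_equiv track=rewrite | github.com/vjosset/tabletop-print-tools | dungeon-generator/main.py | wall_off_unreachable
-- ===== SOURCE A (Python) =====
-- from typing import List, Tuple, Dict, Optional, Set
--
-- def neighbors4(x: int, y: int, W: int, H: int):
--     if x > 0:     yield (x - 1, y)
--     if x < W - 1: yield (x + 1, y)
--     if y > 0:     yield (x, y - 1)
--     if y < H - 1: yield (x, y + 1)
--
-- def wall_off_unreachable(floor: List[List[bool]]) -> List[List[bool]]:
--     """Keep only the largest connected floor component; wall off everything else."""
--     H = len(floor)
--     W = len(floor[0]) if H else 0
--     visited: Set[Tuple[int, int]] = set()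
--     largest: Set[Tuple[int, int]] = set()
--     for y in range(H):
--         for x in range(W):
--             if not floor[y][x] or (x, y) in visited:
--                 continue
--             comp: Set[Tuple[int, int]] = set()
--             stack = [(x, y)]
--             visited.add((x, y))
--             comp.add((x, y))
--             while stack:
--                 cx, cy = stack.pop()
--                 for nx, ny in neighbors4(cx, cy, W, H):
--                     if floor[ny][nx] and (nx, ny) not in visited:
--                         visited.add((nx, ny))
--                         comp.add((nx, ny))
--                         stack.append((nx, ny))
--             if len(comp) > len(largest):
--                 largest = comp
--     if not largest:
--         return floor
--     return [[(x, y) in largest for x in range(W)] for y in range(H)]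
-- ===== SOURCE B (Python) =====
-- from typing import List
--
-- def wall_off_unreachable(floor: List[List[bool]]) -> List[List[bool]]:
--     """Keep only the largest connected floor component; wall off everything else.
--
--     Different decomposition: for each unprocessed floor cell, grow its whole
--     component by iterated neighbour-set saturation to a fixpoint (no stack,
--     no per-cell visited marking), collect all components, then pick the
--     largest with max(key=len) (first maximum, matching A's scan order)."""
--     H = len(floor)
--     W = len(floor[0]) if H else 0
--     comps = []
--     done = set()
--     for y in range(H):
--         for x in range(W):
--             if floor[y][x] and (x, y) not in done:
--                 comp = {(x, y)}
--                 while True: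
--                     grown = comp | {(nx, ny)
--                                     for (cx, cy) in comp
--                                     for (nx, ny) in ((cx - 1, cy), (cx + 1, cy),
--                                                      (cx, cy - 1), (cx, cy + 1))
--                                     if 0 <= nx < W and 0 <= ny < H and floor[ny][nx]}
--                     if len(grown) == len(comp):
--                         break
--                     comp = grown
--                 done |= comp
--                 comps.append(comp)
--     if not comps:
--         return floor
--     best = max(comps, key=len)
--     return [[(x, y) in best for x in range(W)] for y in range(H)]
-- ===== Notes on version B (the rewrite author's own statement) =====
-- stated objective: alternative
-- what changed: Replaces the explicit-stack DFS flood fill with per-cell visited marking by whole-set neighbour saturation to a fixpoint per component, collecting all components and picking the largest with max(key=len) instead of A's online strict-improvement fold.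
import Mathlib
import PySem

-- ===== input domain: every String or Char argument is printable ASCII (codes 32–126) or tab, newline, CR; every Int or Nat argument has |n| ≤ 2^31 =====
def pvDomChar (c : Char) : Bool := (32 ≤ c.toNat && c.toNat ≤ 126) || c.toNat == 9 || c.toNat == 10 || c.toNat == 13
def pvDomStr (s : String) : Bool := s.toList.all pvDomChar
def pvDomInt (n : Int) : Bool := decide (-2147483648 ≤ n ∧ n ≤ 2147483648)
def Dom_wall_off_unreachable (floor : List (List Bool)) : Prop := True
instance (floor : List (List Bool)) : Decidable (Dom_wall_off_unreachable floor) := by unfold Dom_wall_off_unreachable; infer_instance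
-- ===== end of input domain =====

-- B keeps the largest connected floor component like A, but grows each component
-- by whole-set neighbour saturation to a fixpoint (no stack, no per-cell visited
-- marking) and picks the winner with max(key=len); objective: alternative.

-- ===== PORT A =====

-- floor[y][x]; exact for 0 ≤ y < H, 0 ≤ x < W under Pre_ (every row has length ≥ W)
def cellAt (floor : List (List Bool)) (x y : Nat) : Bool :=
  (floor.getD y []).getD x false

def neighbors4 (x y W H : Nat) : List (Nat × Nat) :=
  (if 0 < x then [(x - 1, y)] else []) ++
  (if x + 1 < W then [(x + 1, y)] else []) ++
  (if 0 < y then [(x, y - 1)] else []) ++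
  (if y + 1 < H then [(x, y + 1)] else [])

-- the `while stack:` loop; the stack top is the list head (Python appends and
-- pops at the same end, so traversal order is identical).  Fuel W*H+1 always
-- suffices: each iteration pops one cell and every push adds a fresh cell to
-- `visited` (established inside dfsLoop_spec below).
def dfsLoop (floor : List (List Bool)) (W H : Nat) :
    Nat → List (Nat × Nat) → PySem.Set (Nat × Nat) → PySem.Set (Nat × Nat) →
    PySem.Set (Nat × Nat) × PySem.Set (Nat × Nat)
  | 0, _, visited, comp => (visited, comp)
  | _ + 1, [], visited, comp => (visited, comp)
  | fuel + 1, c :: rest, visited, comp =>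
      let s := (neighbors4 c.1 c.2 W H).foldl
        (fun (s : List (Nat × Nat) × PySem.Set (Nat × Nat) × PySem.Set (Nat × Nat)) n =>
          if cellAt floor n.1 n.2 && !(PySem.Set.contains s.2.1 n) then
            (n :: s.1, PySem.Set.add s.2.1 n, PySem.Set.add s.2.2 n)
          else s) (rest, visited, comp)
      dfsLoop floor W H fuel s.1 s.2.1 s.2.2

-- the nested `for y … for x …` scan; state = (visited, largest)
def scanA (floor : List (List Bool)) (W H : Nat) :
    PySem.Set (Nat × Nat) × PySem.Set (Nat × Nat) :=
  (List.range H).foldl (fun st y =>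
    (List.range W).foldl (fun (st : PySem.Set (Nat × Nat) × PySem.Set (Nat × Nat)) x =>
      if !(cellAt floor x y) || PySem.Set.contains st.1 (x, y) then st
      else
        let d := dfsLoop floor W H (W * H + 1) [(x, y)]
          (PySem.Set.add st.1 (x, y)) (PySem.Set.add PySem.Set.empty (x, y))
        if st.2.length < d.2.length then (d.1, d.2) else (d.1, st.2)) st)
    (PySem.Set.empty, PySem.Set.empty)

def wall_off_unreachable (floor : List (List Bool)) : List (List Bool) :=
  let H := floor.length
  let W := if H ≠ 0 then (floor.headD []).length else 0
  let r := scanA floor W H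
  if r.2 = [] then floor
  else (List.range H).map (fun y => (List.range W).map (fun x => PySem.Set.contains r.2 (x, y)))

-- ===== PORT B =====

-- the candidate list of B's set comprehension: the four neighbours of each cell
-- of comp that are in bounds and floor.  Nat-truncation note: for cx = 0
-- Python's candidate (-1, cy) fails `0 <= nx`, while the truncated candidate
-- (0, cy) is the source cell itself, already in comp, so the grown set is the
-- same (likewise for cy = 0).
def growCands (floor : List (List Bool)) (W H : Nat) (comp : PySem.Set (Nat × Nat)) :
    List (Nat × Nat) :=
  comp.foldl (fun acc c =>
    acc ++ ([(c.1 - 1, c.2), (c.1 + 1, c.2), (c.1, c.2 - 1), (c.1, c.2 + 1)].filter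
      (fun n => n.1 < W && n.2 < H && cellAt floor n.1 n.2))) []

-- the `while True:` saturation loop; `comp | {…}` is Set.union (whose update
-- also performs the comprehension's dedup).  Fuel W*H+1 always suffices: the
-- set grows strictly until the fixpoint (established inside satLoop_spec).
def satLoop (floor : List (List Bool)) (W H : Nat) :
    Nat → PySem.Set (Nat × Nat) → PySem.Set (Nat × Nat)
  | 0, comp => comp
  | fuel + 1, comp =>
      let grown := PySem.Set.union comp (growCands floor W H comp)
      if grown.length = comp.length then comp else satLoop floor W H fuel grown

-- the nested scan; state = (done, comps)
def scanB (floor : List (List Bool)) (W H : Nat) :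
    PySem.Set (Nat × Nat) × List (PySem.Set (Nat × Nat)) :=
  (List.range H).foldl (fun st y =>
    (List.range W).foldl
      (fun (st : PySem.Set (Nat × Nat) × List (PySem.Set (Nat × Nat))) x =>
        if cellAt floor x y && !(PySem.Set.contains st.1 (x, y)) then
          let comp := satLoop floor W H (W * H + 1) (PySem.Set.ofList [(x, y)])
          (PySem.Set.union st.1 comp, st.2 ++ [comp])
        else st) st)
    (PySem.Set.empty, [])

def wall_off_unreachable_alt (floor : List (List Bool)) : List (List Bool) :=
  let H := floor.length
  let W := if H ≠ 0 then (floor.headD []).length else 0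
  let r := scanB floor W H
  if r.2 = [] then floor
  else
    let best := (PySem.List.max? r.2 (fun c => PySem.Set.len c)).getD PySem.Set.empty
    (List.range H).map (fun y => (List.range W).map (fun x => PySem.Set.contains best (x, y)))

-- ===== PRECONDITION & SPEC =====

-- Pre_ excludes exactly the inputs on which the Python A raises IndexError:
-- some row shorter than row 0 (floor[y][x] is evaluated for every x < W where
-- W = len(floor[0])).
def Pre_wall_off_unreachable (floor : List (List Bool)) : Prop :=
  ∀ row ∈ floor, (floor.headD []).length ≤ row.length
instance (floor : List (List Bool)) : Decidable (Pre_wall_off_unreachable floor) := by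
  unfold Pre_wall_off_unreachable; infer_instance

def pvWitness_wall_off_unreachable : List (List Bool) := [[true, false], [true, true]]

def Spec_wall_off_unreachable (floor : List (List Bool)) (out : List (List Bool)) : Prop :=
  out = wall_off_unreachable_alt floor
instance (floor : List (List Bool)) (out : List (List Bool)) :
    Decidable (Spec_wall_off_unreachable floor out) := by
  unfold Spec_wall_off_unreachable; infer_instance

-- ===== CLAIM (what is proved, stated in full; the proofs are below) =====
def Claim_equal_wall_off_unreachable : Prop :=
  ∀ (floor : List (List Bool)), Dom_wall_off_unreachable floor →
    Pre_wall_off_unreachable floor →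
    Spec_wall_off_unreachable floor (wall_off_unreachable floor)

-- ===== LEMMAS AND PROOFS =====

-- a floor cell, in bounds (W, H are passed explicitly; the ports fix them)
def Fl (floor : List (List Bool)) (W H : Nat) (c : Nat × Nat) : Prop :=
  c.1 < W ∧ c.2 < H ∧ cellAt floor c.1 c.2 = true

def Geo (a b : Nat × Nat) : Prop :=
  (a.1 = b.1 ∧ (a.2 = b.2 + 1 ∨ b.2 = a.2 + 1)) ∨
  (a.2 = b.2 ∧ (a.1 = b.1 + 1 ∨ b.1 = a.1 + 1))

def Adj (floor : List (List Bool)) (W H : Nat) (a b : Nat × Nat) : Prop :=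
  Fl floor W H b ∧ Geo a b

def Rch (floor : List (List Bool)) (W H : Nat) (a b : Nat × Nat) : Prop :=
  Fl floor W H a ∧ Relation.ReflTransGen (Adj floor W H) a b

theorem Rch_fl {floor W H} {a b : Nat × Nat} (h : Rch floor W H a b) : Fl floor W H b := by
  obtain ⟨ha, h⟩ := h
  induction h with
  | refl => exact ha
  | tail _ h2 _ => exact h2.1

theorem Rch_refl {floor W H} {a : Nat × Nat} (h : Fl floor W H a) : Rch floor W H a a :=
  ⟨h, Relation.ReflTransGen.refl⟩

theorem Rch_tail {floor W H} {a b c : Nat × Nat} (h : Rch floor W H a b)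
    (h2 : Adj floor W H b c) : Rch floor W H a c :=
  ⟨h.1, h.2.tail h2⟩

theorem Adj_symm {floor W H} {a b : Nat × Nat} (ha : Fl floor W H a)
    (h : Adj floor W H a b) : Adj floor W H b a := by
  refine ⟨ha, ?_⟩
  obtain ⟨_, hg⟩ := h
  unfold Geo at hg ⊢; omega

theorem mem_neighbors4 {floor : List (List Bool)} {W H : Nat} {a b : Nat × Nat}
    (ha1 : a.1 < W) (ha2 : a.2 < H) :
    (b ∈ neighbors4 a.1 a.2 W H ∧ cellAt floor b.1 b.2 = true) ↔ Adj floor W H a b := by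
  obtain ⟨ax, ay⟩ := a
  obtain ⟨bx, by'⟩ := b
  simp only [neighbors4, Adj, Fl, Geo, List.mem_append, List.mem_ite_nil_right,
    List.mem_singleton, Prod.mk.injEq] at *
  constructor
  · rintro ⟨h, hc⟩
    refine ⟨⟨?_, ?_, hc⟩, ?_⟩ <;> omega
  · rintro ⟨⟨h1, h2, hc⟩, hg⟩
    refine ⟨?_, hc⟩
    omega

theorem card_bound {W H : Nat} (l : List (Nat × Nat)) (hn : l.Nodup)
    (hb : ∀ c ∈ l, c.1 < W ∧ c.2 < H) : l.length ≤ W * H := by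
  classical
  have hsub : l.toFinset ⊆ (Finset.range W) ×ˢ (Finset.range H) := by
    intro c hc
    rw [List.mem_toFinset] at hc
    rcases hb c hc with ⟨h1, h2⟩
    simp [Finset.mem_product, h1, h2]
  have := Finset.card_le_card hsub
  rwa [List.toFinset_card_of_nodup hn, Finset.card_product, Finset.card_range,
    Finset.card_range] at this

theorem rch_not_mem_closed {floor W H} {V : List (Nat × Nat)}
    (_hFl : ∀ p ∈ V, Fl floor W H p)
    (hcl : ∀ p ∈ V, ∀ e, Adj floor W H p e → e ∈ V)
    {a b : Nat × Nat} (ha : a ∉ V) (h : Rch floor W H a b) : b ∉ V := by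
  obtain ⟨hfa, h⟩ := h
  induction h with
  | refl => exact ha
  | tail h1 h2 ih =>
    rename_i m d
    intro hd
    have hfm : Fl floor W H m := Rch_fl ⟨hfa, h1⟩
    exact ih (hcl d hd m (Adj_symm hfm h2))

theorem growCands_sound {floor : List (List Bool)} {W H : Nat} {comp : List (Nat × Nat)}
    {b : Nat × Nat} (h : b ∈ growCands floor W H comp) :
    Fl floor W H b ∧ ∃ a ∈ comp, Geo a b ∨ b = a := by
  unfold growCands at h
  rw [PySem.List.foldl_append_eq_flatMap] at h
  simp only [List.nil_append, List.mem_flatMap, List.mem_filter, Bool.and_eq_true,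
    decide_eq_true_eq] at h
  obtain ⟨a, ha, hmem, ⟨h1, h2⟩, h3⟩ := h
  refine ⟨⟨h1, h2, h3⟩, a, ha, ?_⟩
  obtain ⟨ax, ay⟩ := a
  obtain ⟨bx, by'⟩ := b
  simp only [List.mem_cons, List.not_mem_nil, or_false, Prod.mk.injEq] at hmem
  simp only [Geo, Prod.mk.injEq]
  omega

theorem growCands_complete {floor : List (List Bool)} {W H : Nat} {comp : List (Nat × Nat)}
    {a b : Nat × Nat} (ha : a ∈ comp) (h : Adj floor W H a b) :
    b ∈ growCands floor W H comp := by
  obtain ⟨⟨h1, h2, h3⟩, hg⟩ := h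
  unfold growCands
  rw [PySem.List.foldl_append_eq_flatMap]
  simp only [List.nil_append, List.mem_flatMap, List.mem_filter, Bool.and_eq_true,
    decide_eq_true_eq]
  refine ⟨a, ha, ?_, ⟨h1, h2⟩, h3⟩
  obtain ⟨ax, ay⟩ := a
  obtain ⟨bx, by'⟩ := b
  simp only [Geo] at hg
  simp only [List.mem_cons, List.not_mem_nil, or_false, Prod.mk.injEq]
  omega

theorem stepFold {floor : List (List Bool)} :
    ∀ (ns : List (Nat × Nat)) (st vis cp : List (Nat × Nat)),
    vis.Nodup → cp.Nodup →
    (let r := ns.foldl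
        (fun (s : List (Nat × Nat) × PySem.Set (Nat × Nat) × PySem.Set (Nat × Nat)) n =>
          if cellAt floor n.1 n.2 && !(PySem.Set.contains s.2.1 n) then
            (n :: s.1, PySem.Set.add s.2.1 n, PySem.Set.add s.2.2 n)
          else s) (st, vis, cp)
     r.2.1.Nodup ∧ r.2.2.Nodup ∧
     (∀ d, d ∈ r.2.1 ↔ d ∈ vis ∨ (d ∈ ns ∧ cellAt floor d.1 d.2 = true)) ∧
     (∀ d, d ∈ r.2.2 ↔ d ∈ cp ∨ (d ∈ ns ∧ cellAt floor d.1 d.2 = true ∧ d ∉ vis)) ∧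
     (∀ d, d ∈ r.1 ↔ d ∈ st ∨ (d ∈ ns ∧ cellAt floor d.1 d.2 = true ∧ d ∉ vis)) ∧
     r.1.length + vis.length = st.length + r.2.1.length ∧
     vis.length ≤ r.2.1.length)
  | [], st, vis, cp => by
    intro hv hcp
    simp [List.foldl_nil]
    exact ⟨hv, hcp⟩
  | n :: ns, st, vis, cp => by
    intro hv hcp
    simp only [List.foldl_cons]
    by_cases hc : cellAt floor n.1 n.2 = true
    · by_cases hm : n ∈ vis
      · rw [if_neg (by simp [hc, hm])]
        obtain ⟨h1, h2, h3, h4, h5, h6, h7⟩ := stepFold ns st vis cp hv hcp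
        refine ⟨h1, h2, ?_, ?_, ?_, h6, h7⟩
        · intro d; rw [h3]; constructor
          · rintro (h | ⟨h, hP⟩)
            · exact Or.inl h
            · exact Or.inr ⟨List.mem_cons_of_mem _ h, hP⟩
          · rintro (h | ⟨h, hP⟩)
            · exact Or.inl h
            · rcases List.mem_cons.mp h with rfl | h
              · exact Or.inl hm
              · exact Or.inr ⟨h, hP⟩
        · intro d; rw [h4]; constructor
          · rintro (h | ⟨h, hP, hnv⟩)
            · exact Or.inl h
            · exact Or.inr ⟨List.mem_cons_of_mem _ h, hP, hnv⟩
          · rintro (h | ⟨h, hP, hnv⟩)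
            · exact Or.inl h
            · rcases List.mem_cons.mp h with rfl | h
              · exact absurd hm hnv
              · exact Or.inr ⟨h, hP, hnv⟩
        · intro d; rw [h5]; constructor
          · rintro (h | ⟨h, hP, hnv⟩)
            · exact Or.inl h
            · exact Or.inr ⟨List.mem_cons_of_mem _ h, hP, hnv⟩
          · rintro (h | ⟨h, hP, hnv⟩)
            · exact Or.inl h
            · rcases List.mem_cons.mp h with rfl | h
              · exact absurd hm hnv
              · exact Or.inr ⟨h, hP, hnv⟩
      · rw [if_pos (by simp [hc, hm])]
        have hva : PySem.Set.add vis n = vis ++ [n] := PySem.Set.add_of_not_mem hm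
        obtain ⟨h1, h2, h3, h4, h5, h6, h7⟩ :=
          stepFold ns (n :: st) (PySem.Set.add vis n) (PySem.Set.add cp n)
            (PySem.Set.nodup_add vis n hv) (PySem.Set.nodup_add cp n hcp)
        refine ⟨h1, h2, ?_, ?_, ?_, ?_, ?_⟩
        · intro d; rw [h3, PySem.Set.mem_add]; constructor
          · rintro ((h | rfl) | ⟨h, hP⟩)
            · exact Or.inl h
            · exact Or.inr ⟨List.mem_cons_self, hc⟩
            · exact Or.inr ⟨List.mem_cons_of_mem _ h, hP⟩
          · rintro (h | ⟨h, hP⟩)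
            · exact Or.inl (Or.inl h)
            · rcases List.mem_cons.mp h with rfl | h
              · exact Or.inl (Or.inr rfl)
              · exact Or.inr ⟨h, hP⟩
        · intro d; rw [h4, PySem.Set.mem_add]; constructor
          · rintro ((h | rfl) | ⟨h, hP, hnv⟩)
            · exact Or.inl h
            · exact Or.inr ⟨List.mem_cons_self, hc, hm⟩
            · refine Or.inr ⟨List.mem_cons_of_mem _ h, hP, fun hd => hnv ?_⟩
              rw [PySem.Set.mem_add]; exact Or.inl hd
          · rintro (h | ⟨h, hP, hnv⟩)
            · exact Or.inl (Or.inl h)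
            · rcases List.mem_cons.mp h with rfl | h
              · exact Or.inl (Or.inr rfl)
              · by_cases hdn : d = n
                · subst hdn; exact Or.inl (Or.inr rfl)
                · refine Or.inr ⟨h, hP, ?_⟩
                  rw [PySem.Set.mem_add]
                  rintro (hd | hd)
                  · exact hnv hd
                  · exact hdn hd
        · intro d; rw [h5]; constructor
          · rintro (h | ⟨h, hP, hnv⟩)
            · rcases List.mem_cons.mp h with rfl | h
              · exact Or.inr ⟨List.mem_cons_self, hc, hm⟩
              · exact Or.inl h
            · refine Or.inr ⟨List.mem_cons_of_mem _ h, hP, fun hd => hnv ?_⟩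
              rw [PySem.Set.mem_add]; exact Or.inl hd
          · rintro (h | ⟨h, hP, hnv⟩)
            · exact Or.inl (List.mem_cons_of_mem _ h)
            · rcases List.mem_cons.mp h with rfl | h
              · exact Or.inl List.mem_cons_self
              · by_cases hdn : d = n
                · subst hdn; exact Or.inl List.mem_cons_self
                · refine Or.inr ⟨h, hP, ?_⟩
                  rw [PySem.Set.mem_add]
                  rintro (hd | hd)
                  · exact hnv hd
                  · exact hdn hd
        · have : (PySem.Set.add vis n).length = vis.length + 1 := by
            rw [hva]; simp
          simp only [List.length_cons] at h6
          omega
        · have : (PySem.Set.add vis n).length = vis.length + 1 := by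
            rw [hva]; simp
          omega
    · rw [if_neg (by simp [hc])]
      obtain ⟨h1, h2, h3, h4, h5, h6, h7⟩ := stepFold ns st vis cp hv hcp
      refine ⟨h1, h2, ?_, ?_, ?_, h6, h7⟩
      · intro d; rw [h3]; constructor
        · rintro (h | ⟨h, hP⟩)
          · exact Or.inl h
          · exact Or.inr ⟨List.mem_cons_of_mem _ h, hP⟩
        · rintro (h | ⟨h, hP⟩)
          · exact Or.inl h
          · rcases List.mem_cons.mp h with rfl | h
            · exact absurd hP hc
            · exact Or.inr ⟨h, hP⟩
      · intro d; rw [h4]; constructor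
        · rintro (h | ⟨h, hP, hnv⟩)
          · exact Or.inl h
          · exact Or.inr ⟨List.mem_cons_of_mem _ h, hP, hnv⟩
        · rintro (h | ⟨h, hP, hnv⟩)
          · exact Or.inl h
          · rcases List.mem_cons.mp h with rfl | h
            · exact absurd hP hc
            · exact Or.inr ⟨h, hP, hnv⟩
      · intro d; rw [h5]; constructor
        · rintro (h | ⟨h, hP, hnv⟩)
          · exact Or.inl h
          · exact Or.inr ⟨List.mem_cons_of_mem _ h, hP, hnv⟩
        · rintro (h | ⟨h, hP, hnv⟩)
          · exact Or.inl h
          · rcases List.mem_cons.mp h with rfl | h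
            · exact absurd hP hc
            · exact Or.inr ⟨h, hP, hnv⟩

theorem dfsLoop_spec {floor : List (List Bool)} {W H : Nat} {V : List (Nat × Nat)}
    {c : Nat × Nat}
    (hVFl : ∀ p ∈ V, Fl floor W H p)
    (hVcl : ∀ p ∈ V, ∀ e, Adj floor W H p e → e ∈ V)
    (hcV : c ∉ V) :
    ∀ (fuel : Nat) (stack : List (Nat × Nat)) (visited comp : List (Nat × Nat)),
    (∀ d, d ∈ visited ↔ d ∈ V ∨ d ∈ comp) →
    visited.Nodup → comp.Nodup →
    (∀ d ∈ comp, Rch floor W H c d) →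
    c ∈ comp →
    (∀ d ∈ stack, d ∈ comp) →
    (∀ d ∈ comp, d ∉ stack → ∀ e, Adj floor W H d e → e ∈ visited) →
    stack.length + (W * H + 1 - visited.length) ≤ fuel →
    (∀ d, d ∈ (dfsLoop floor W H fuel stack visited comp).2 ↔ Rch floor W H c d) ∧
    (∀ d, d ∈ (dfsLoop floor W H fuel stack visited comp).1 ↔ d ∈ V ∨ Rch floor W H c d) ∧
    (dfsLoop floor W H fuel stack visited comp).1.Nodup ∧
    (dfsLoop floor W H fuel stack visited comp).2.Nodup := by
  intro fuel
  induction fuel with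
  | zero =>
    intro stack visited comp hVis hVn hCn hRch hcC hstk hfr hfuel
    exfalso
    have hVisFl : ∀ d ∈ visited, Fl floor W H d := by
      intro d hd
      rcases (hVis d).mp hd with h | h
      · exact hVFl d h
      · exact Rch_fl (hRch d h)
    have hb := card_bound visited hVn (fun d hd => ⟨(hVisFl d hd).1, (hVisFl d hd).2.1⟩)
    omega
  | succ fuel ih =>
    intro stack visited comp hVis hVn hCn hRch hcC hstk hfr hfuel
    match stack with
    | [] =>
      show (∀ d, d ∈ comp ↔ _) ∧ (∀ d, d ∈ visited ↔ _) ∧ _ ∧ _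
      have hcomp : ∀ d, d ∈ comp ↔ Rch floor W H c d := by
        intro d
        constructor
        · exact hRch d
        · rintro ⟨hFlc, hrt⟩
          induction hrt with
          | refl => exact hcC
          | tail h1 h2 ih2 =>
            rename_i m e
            have hm : m ∈ comp := ih2
            have he := hfr m hm (List.not_mem_nil) e h2
            rcases (hVis e).mp he with h | h
            · exact absurd h (rch_not_mem_closed hVFl hVcl hcV ⟨hFlc, h1.tail h2⟩)
            · exact h
      refine ⟨hcomp, ?_, hVn, hCn⟩
      intro d
      rw [hVis d, hcomp d]
    | c₀ :: rest =>
      show (∀ d, d ∈ (dfsLoop floor W H fuel _ _ _).2 ↔ _) ∧ _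
      obtain ⟨g1, g2, g3, g4, g5, g6, g7⟩ :=
        stepFold (floor := floor) (neighbors4 c₀.1 c₀.2 W H) rest visited comp hVn hCn
      have hc₀comp : c₀ ∈ comp := hstk c₀ List.mem_cons_self
      have hRchc₀ : Rch floor W H c c₀ := hRch c₀ hc₀comp
      have hFlc₀ : Fl floor W H c₀ := Rch_fl hRchc₀
      have hnb : ∀ d : Nat × Nat,
          (d ∈ neighbors4 c₀.1 c₀.2 W H ∧ cellAt floor d.1 d.2 = true) ↔
            Adj floor W H c₀ d :=
        fun d => mem_neighbors4 hFlc₀.1 hFlc₀.2.1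
      have hVisFl : ∀ d ∈ visited, Fl floor W H d := by
        intro d hd
        rcases (hVis d).mp hd with h | h
        · exact hVFl d h
        · exact Rch_fl (hRch d h)
      apply ih
      · -- memVis'
        intro d
        rw [g3, g4]
        constructor
        · rintro (h | ⟨hm, hcell⟩)
          · rcases (hVis d).mp h with h' | h'
            · exact Or.inl h'
            · exact Or.inr (Or.inl h')
          · by_cases hv : d ∈ visited
            · rcases (hVis d).mp hv with h' | h'
              · exact Or.inl h'
              · exact Or.inr (Or.inl h')
            · exact Or.inr (Or.inr ⟨hm, hcell, hv⟩)
        · rintro (h | (h | ⟨hm, hcell, hv⟩))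
          · exact Or.inl ((hVis d).mpr (Or.inl h))
          · exact Or.inl ((hVis d).mpr (Or.inr h))
          · exact Or.inr ⟨hm, hcell⟩
      · exact g1
      · exact g2
      · -- comp' ⊆ Rch
        intro d hd
        rcases (g4 d).mp hd with h | ⟨hm, hcell, _⟩
        · exact hRch d h
        · exact Rch_tail hRchc₀ ((hnb d).mp ⟨hm, hcell⟩)
      · exact (g4 c).mpr (Or.inl hcC)
      · -- stack' ⊆ comp'
        intro d hd
        rcases (g5 d).mp hd with h | h
        · exact (g4 d).mpr (Or.inl (hstk d (List.mem_cons_of_mem _ h)))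
        · exact (g4 d).mpr (Or.inr h)
      · -- frontier
        intro d hd hds e hAdj
        rcases (g4 d).mp hd with h | h
        · by_cases hdc : d = c₀
          · subst hdc
            have := (hnb e).mpr hAdj
            exact (g3 e).mpr (Or.inr ⟨this.1, this.2⟩)
          · have hdrest : d ∉ rest := fun hr => hds ((g5 d).mpr (Or.inl hr))
            have hdstk : d ∉ c₀ :: rest := by
              intro hx
              rcases List.mem_cons.mp hx with h' | h'
              · exact hdc h'
              · exact hdrest h'
            exact (g3 e).mpr (Or.inl (hfr d h hdstk e hAdj))
        · exact absurd ((g5 d).mpr (Or.inr h)) hds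
      · -- fuel
        have hFl' : ∀ d ∈ (((neighbors4 c₀.1 c₀.2 W H).foldl
            (fun (s : List (Nat × Nat) × PySem.Set (Nat × Nat) × PySem.Set (Nat × Nat)) n =>
              if cellAt floor n.1 n.2 && !(PySem.Set.contains s.2.1 n) then
                (n :: s.1, PySem.Set.add s.2.1 n, PySem.Set.add s.2.2 n)
              else s) (rest, visited, comp)).2.1), d.1 < W ∧ d.2 < H := by
          intro d hd
          rcases (g3 d).mp hd with h | ⟨hm, hcell⟩
          · exact ⟨(hVisFl d h).1, (hVisFl d h).2.1⟩
          · have := ((hnb d).mp ⟨hm, hcell⟩).1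
            exact ⟨this.1, this.2.1⟩
        have hb := card_bound _ g1 hFl'
        simp only [List.length_cons] at hfuel
        omega

theorem satLoop_spec {floor : List (List Bool)} {W H : Nat} {c : Nat × Nat} :
    ∀ (fuel : Nat) (comp : List (Nat × Nat)),
    comp.Nodup → c ∈ comp → (∀ d ∈ comp, Rch floor W H c d) →
    W * H + 1 ≤ fuel + comp.length →
    (∀ d, d ∈ satLoop floor W H fuel comp ↔ Rch floor W H c d) ∧
    (satLoop floor W H fuel comp).Nodup := by
  intro fuel
  induction fuel with
  | zero =>
    intro comp hn hcc hr hf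
    exfalso
    have hb := card_bound comp hn (fun d hd => ⟨(Rch_fl (hr d hd)).1, (Rch_fl (hr d hd)).2.1⟩)
    omega
  | succ fuel ih =>
    intro comp hn hcc hr hf
    have happ : PySem.Set.union comp (growCands floor W H comp)
        = comp ++ List.filter (fun y => !comp.contains y)
            (PySem.Set.ofList (growCands floor W H comp)) :=
      PySem.Set.update_eq_append_filter comp _
    by_cases hlen : (PySem.Set.union comp (growCands floor W H comp)).length = comp.length
    · have hres : satLoop floor W H (fuel + 1) comp = comp := by
        simp only [satLoop]
        rw [if_pos hlen]
      rw [hres]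
      have hfilnil : List.filter (fun y => !comp.contains y)
          (PySem.Set.ofList (growCands floor W H comp)) = [] := by
        have h2 := congrArg List.length happ
        rw [hlen, List.length_append] at h2
        have : (List.filter (fun y => !comp.contains y)
            (PySem.Set.ofList (growCands floor W H comp))).length = 0 := by omega
        exact List.length_eq_zero_iff.mp this
      have hclosed : ∀ d ∈ comp, ∀ e, Adj floor W H d e → e ∈ comp := by
        intro d hd e hAdj
        by_contra he
        have hcands : e ∈ growCands floor W H comp := growCands_complete hd hAdj
        have : e ∈ List.filter (fun y => !comp.contains y)
            (PySem.Set.ofList (growCands floor W H comp)) := by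
          refine List.mem_filter.mpr ⟨(PySem.Set.mem_ofList _ _).mpr hcands, ?_⟩
          simp only [Bool.not_eq_eq_eq_not, Bool.not_true, ← Bool.not_eq_true]
          simp [he]
        rw [hfilnil] at this
        cases this
      refine ⟨fun d => ⟨hr d, ?_⟩, hn⟩
      rintro ⟨hFlc, hrt⟩
      induction hrt with
      | refl => exact hcc
      | tail h1 h2 ih2 =>
        rename_i m e
        exact hclosed m ih2 e h2
    · have hres : satLoop floor W H (fuel + 1) comp
          = satLoop floor W H fuel (PySem.Set.union comp (growCands floor W H comp)) := by
        simp only [satLoop]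
        rw [if_neg hlen]
      rw [hres]
      have hmem : ∀ d, d ∈ PySem.Set.union comp (growCands floor W H comp) ↔
          d ∈ comp ∨ d ∈ growCands floor W H comp := fun d => PySem.Set.mem_union _ _ _
      apply ih
      · exact PySem.Set.nodup_union _ _ hn
      · exact (hmem c).mpr (Or.inl hcc)
      · intro d hd
        rcases (hmem d).mp hd with h | h
        · exact hr d h
        · obtain ⟨hFl, a, ha, hg⟩ := growCands_sound h
          rcases hg with hg | heq
          · exact Rch_tail (hr a ha) ⟨hFl, hg⟩
          · rw [heq]; exact hr a ha
      · have h2 := congrArg List.length happ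
        rw [List.length_append] at h2
        have : comp.length < (PySem.Set.union comp (growCands floor W H comp)).length := by
          omega
        omega

theorem foldl_nested {σ : Type} (f : σ → Nat → Nat → σ) :
    ∀ (ys : List Nat) (xs : List Nat) (init : σ),
    ys.foldl (fun st y => xs.foldl (fun st x => f st x y) st) init
      = (ys.flatMap (fun y => xs.map (fun x => (x, y)))).foldl
          (fun st p => f st p.1 p.2) init
  | [], xs, init => rfl
  | y :: ys, xs, init => by
    simp only [List.foldl_cons, List.flatMap_cons, List.foldl_append, List.foldl_map]
    exact foldl_nested f ys xs _

theorem max?_cons {α : Type} (key : α → Int) :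
    ∀ (bs : List α) (b : α),
    PySem.List.max? (b :: bs) key
      = some (bs.foldl (fun m x => if key m < key x then x else m) b) := by
  have haux : ∀ (bs : List α) (b : α),
      bs.foldl (fun acc x => match acc with
        | none => some x
        | some m => if key m < key x then some x else some m) (some b)
      = some (bs.foldl (fun m x => if key m < key x then x else m) b) := by
    intro bs
    induction bs with
    | nil => intro b; rfl
    | cons x bs ih =>
      intro b
      simp only [List.foldl_cons]
      by_cases h : key b < key x
      · rw [if_pos h, if_pos h, ih]
      · rw [if_neg h, if_neg h, ih]
  intro bs b
  unfold PySem.List.max?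
  simp only [List.foldl_cons]
  exact haux bs b

def ES (a b : List (Nat × Nat)) : Prop :=
  a.Nodup ∧ b.Nodup ∧ a ≠ [] ∧ (∀ d, d ∈ a ↔ d ∈ b)

theorem ES_len {a b : List (Nat × Nat)} (h : ES a b) : a.length = b.length := by
  obtain ⟨hna, hnb, _, hm⟩ := h
  exact ((List.perm_ext_iff_of_nodup hna hnb).mpr hm).length_eq

theorem pick_parallel :
    ∀ (csA csB : List (List (Nat × Nat))) (a b : List (Nat × Nat)),
    List.Forall₂ ES csA csB → ES a b →
    ES (csA.foldl (fun m c => if m.length < c.length then c else m) a)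
       (csB.foldl (fun m c => if PySem.Set.len m < PySem.Set.len c then c else m) b) := by
  intro csA
  induction csA with
  | nil =>
    intro csB a b hF he
    rcases List.forall₂_nil_left_iff.mp hF with rfl
    exact he
  | cons x xs ih =>
    intro csB a b hF he
    rcases List.forall₂_cons_left_iff.mp hF with ⟨y, ys, hxy, hF', rfl⟩
    simp only [List.foldl_cons]
    have hlen : a.length = b.length := ES_len he
    have hlenxy : x.length = y.length := ES_len hxy
    by_cases h : a.length < x.length
    · rw [if_pos h, if_pos (by
        simp only [PySem.Set.len]
        exact_mod_cast hlen ▸ hlenxy ▸ h)]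
      exact ih ys x y hF' hxy
    · rw [if_neg h, if_neg (by
        simp only [PySem.Set.len]
        rw [← hlen, ← hlenxy]
        exact_mod_cast h)]
      exact ih ys a b hF' he

theorem scan_rel {floor : List (List Bool)} {W H : Nat} :
    ∀ (L : List (Nat × Nat)) (vA dB : List (Nat × Nat))
      (csA csB : List (List (Nat × Nat))),
    (∀ p ∈ L, p.1 < W ∧ p.2 < H) →
    vA.Nodup → dB.Nodup → (∀ d, d ∈ vA ↔ d ∈ dB) →
    (∀ p ∈ vA, Fl floor W H p) →
    (∀ p ∈ vA, ∀ e, Adj floor W H p e → e ∈ vA) →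
    List.Forall₂ ES csA csB →
    ∃ csA',
      List.Forall₂ ES csA'
        (L.foldl (fun (st : PySem.Set (Nat × Nat) × List (PySem.Set (Nat × Nat))) p =>
          if cellAt floor p.1 p.2 && !(PySem.Set.contains st.1 p) then
            let comp := satLoop floor W H (W * H + 1) (PySem.Set.ofList [p])
            (PySem.Set.union st.1 comp, st.2 ++ [comp])
          else st) (dB, csB)).2 ∧
      (L.foldl (fun (st : PySem.Set (Nat × Nat) × PySem.Set (Nat × Nat)) p =>
        if !(cellAt floor p.1 p.2) || PySem.Set.contains st.1 p then st
        else
          let d := dfsLoop floor W H (W * H + 1) [p]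
            (PySem.Set.add st.1 p) (PySem.Set.add PySem.Set.empty p)
          if st.2.length < d.2.length then (d.1, d.2) else (d.1, st.2))
        (vA, csA.foldl (fun b c => if b.length < c.length then c else b) [])).2
      = csA'.foldl (fun b c => if b.length < c.length then c else b) [] := by
  intro L
  induction L with
  | nil =>
    intro vA dB csA csB _ _ _ _ _ _ hF
    exact ⟨csA, hF, rfl⟩
  | cons p L ih =>
    intro vA dB csA csB hLb hvn hdn hvd hvFl hvCl hF
    have hpb := hLb p List.mem_cons_self
    have hLb' : ∀ q ∈ L, q.1 < W ∧ q.2 < H := fun q hq => hLb q (List.mem_cons_of_mem _ hq)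
    simp only [List.foldl_cons]
    by_cases hc : cellAt floor p.1 p.2 = true
    · by_cases hm : p ∈ vA
      · -- both skip
        rw [if_neg (by simp [hc]; exact (hvd p).mp hm),
            if_pos (by simp [hc]; exact hm)]
        exact ih vA dB csA csB hLb' hvn hdn hvd hvFl hvCl hF
      · -- both fire
        have hmB : p ∉ dB := fun h => hm ((hvd p).mpr h)
        rw [if_pos (by simp [hc]; exact hmB),
            if_neg (by simp [hc]; exact hm)]
        have hFlp : Fl floor W H p := ⟨hpb.1, hpb.2, hc⟩
        -- A's inner dfs
        have hinit : PySem.Set.add (PySem.Set.empty : PySem.Set (Nat × Nat)) p = [p] := rfl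
        have hva : PySem.Set.add vA p = vA ++ [p] := PySem.Set.add_of_not_mem hm
        obtain ⟨hA2, hA1, hA1n, hA2n⟩ :=
          dfsLoop_spec (V := vA) (c := p) hvFl hvCl hm (W * H + 1) [p]
            (PySem.Set.add vA p) (PySem.Set.add PySem.Set.empty p)
            (by intro d; rw [hva, hinit]; simp [List.mem_append])
            (PySem.Set.nodup_add vA p hvn)
            (by rw [hinit]; simp)
            (by rw [hinit]; intro d hd; simp at hd; subst hd; exact Rch_refl hFlp)
            (by rw [hinit]; simp)
            (by rw [hinit]; intro d hd; simp at hd; subst hd; simp)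
            (by rw [hinit]; intro d hd hnd; simp at hd; subst hd; simp at hnd)
            (by rw [hva]; simp [List.length_append]; omega)
        -- B's inner saturation
        have hofl : (PySem.Set.ofList [p] : PySem.Set (Nat × Nat)) = [p] := rfl
        obtain ⟨hB, hBn⟩ :=
          satLoop_spec (c := p) (W * H + 1) (PySem.Set.ofList [p])
            (by rw [hofl]; simp)
            (by rw [hofl]; simp)
            (by rw [hofl]; intro d hd; simp at hd; subst hd; exact Rch_refl hFlp)
            (by omega)
        set dA := dfsLoop floor W H (W * H + 1) [p] (PySem.Set.add vA p)
          (PySem.Set.add PySem.Set.empty p) with hdA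
        set compB := satLoop floor W H (W * H + 1) (PySem.Set.ofList [p]) with hcompB
        have hES : ES dA.2 compB := by
          refine ⟨hA2n, hBn, ?_, ?_⟩
          · exact List.ne_nil_of_mem ((hA2 p).mpr (Rch_refl hFlp))
          · intro d; rw [hA2 d, hB d]
        -- fold largest update into pickfold (csA ++ [dA.2])
        have hpair : (if List.length (csA.foldl
              (fun b c => if List.length b < List.length c then c else b) [])
              < List.length dA.2
            then (dA.1, dA.2)
            else (dA.1, csA.foldl (fun b c => if List.length b < List.length c then c else b) []))
            = (dA.1, (csA ++ [dA.2]).foldl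
                (fun b c => if List.length b < List.length c then c else b) []) := by
          rw [List.foldl_append]
          simp only [List.foldl_cons, List.foldl_nil]
          split_ifs <;> rfl
        rw [hpair]
        apply ih
        · exact hLb'
        · exact hA1n
        · exact PySem.Set.nodup_union dB compB hdn
        · intro d
          rw [hA1 d, PySem.Set.mem_union]
          rw [hB d]
          constructor
          · rintro (h | h)
            · exact Or.inl ((hvd d).mp h)
            · exact Or.inr h
          · rintro (h | h)
            · exact Or.inl ((hvd d).mpr h)
            · exact Or.inr h
        · intro q hq
          rcases (hA1 q).mp hq with h | h
          · exact hvFl q h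
          · exact Rch_fl h
        · intro q hq e hAdj
          rcases (hA1 q).mp hq with h | h
          · exact (hA1 e).mpr (Or.inl (hvCl q h e hAdj))
          · exact (hA1 e).mpr (Or.inr (Rch_tail h hAdj))
        · exact List.rel_append hF (List.forall₂_cons.mpr ⟨hES, List.Forall₂.nil⟩)
    · -- no floor cell: both skip
      rw [if_neg (by simp [hc]), if_pos (by simp [hc])]
      exact ih vA dB csA csB hLb' hvn hdn hvd hvFl hvCl hF

theorem scanA_eq (floor : List (List Bool)) (W H : Nat) :
    scanA floor W H
      = ((List.range H).flatMap (fun y => (List.range W).map (fun x => (x, y)))).foldl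
          (fun (st : PySem.Set (Nat × Nat) × PySem.Set (Nat × Nat)) p =>
            if !(cellAt floor p.1 p.2) || PySem.Set.contains st.1 p then st
            else
              let d := dfsLoop floor W H (W * H + 1) [p]
                (PySem.Set.add st.1 p) (PySem.Set.add PySem.Set.empty p)
              if st.2.length < d.2.length then (d.1, d.2) else (d.1, st.2))
          (PySem.Set.empty, PySem.Set.empty) := by
  unfold scanA
  rw [foldl_nested (fun st x y =>
    if !(cellAt floor x y) || PySem.Set.contains st.1 (x, y) then st
    else
      let d := dfsLoop floor W H (W * H + 1) [(x, y)]
        (PySem.Set.add st.1 (x, y)) (PySem.Set.add PySem.Set.empty (x, y))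
      if st.2.length < d.2.length then (d.1, d.2) else (d.1, st.2))
    (List.range H) (List.range W)]

theorem scanB_eq (floor : List (List Bool)) (W H : Nat) :
    scanB floor W H
      = ((List.range H).flatMap (fun y => (List.range W).map (fun x => (x, y)))).foldl
          (fun (st : PySem.Set (Nat × Nat) × List (PySem.Set (Nat × Nat))) p =>
            if cellAt floor p.1 p.2 && !(PySem.Set.contains st.1 p) then
              let comp := satLoop floor W H (W * H + 1) (PySem.Set.ofList [p])
              (PySem.Set.union st.1 comp, st.2 ++ [comp])
            else st)
          (PySem.Set.empty, []) := by
  unfold scanB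
  rw [foldl_nested (fun st x y =>
    if cellAt floor x y && !(PySem.Set.contains st.1 (x, y)) then
      let comp := satLoop floor W H (W * H + 1) (PySem.Set.ofList [(x, y)])
      (PySem.Set.union st.1 comp, st.2 ++ [comp])
    else st)
    (List.range H) (List.range W)]

theorem contains_congr {u v : List (Nat × Nat)} (h : ∀ d, d ∈ u ↔ d ∈ v) (p : Nat × Nat) :
    PySem.Set.contains u p = PySem.Set.contains v p := by
  rw [Bool.eq_iff_iff, PySem.Set.contains_iff, PySem.Set.contains_iff]
  exact h p

theorem main_eq (floor : List (List Bool)) :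
    wall_off_unreachable floor = wall_off_unreachable_alt floor := by
  set Hn := floor.length with hH
  set Wn := if Hn ≠ 0 then (floor.headD []).length else 0 with hW
  have hA : wall_off_unreachable floor
      = (if (scanA floor Wn Hn).2 = [] then floor
         else (List.range Hn).map (fun y => (List.range Wn).map
           (fun x => PySem.Set.contains (scanA floor Wn Hn).2 (x, y)))) := rfl
  have hB : wall_off_unreachable_alt floor
      = (if (scanB floor Wn Hn).2 = [] then floor
         else (List.range Hn).map (fun y => (List.range Wn).map
           (fun x => PySem.Set.contains
             ((PySem.List.max? (scanB floor Wn Hn).2 (fun c => PySem.Set.len c)).getD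
               PySem.Set.empty) (x, y)))) := rfl
  rw [hA, hB, scanA_eq, scanB_eq]
  have hbounds : ∀ p ∈ ((List.range Hn).flatMap
      (fun y => (List.range Wn).map (fun x => (x, y)))), p.1 < Wn ∧ p.2 < Hn := by
    intro p hp
    simp only [List.mem_flatMap, List.mem_map, List.mem_range] at hp
    obtain ⟨y, hy, x, hx, rfl⟩ := hp
    exact ⟨hx, hy⟩
  obtain ⟨csA', hF2, hlg⟩ := scan_rel (floor := floor) (W := Wn) (H := Hn)
    ((List.range Hn).flatMap (fun y => (List.range Wn).map (fun x => (x, y))))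
    PySem.Set.empty PySem.Set.empty [] [] hbounds List.nodup_nil List.nodup_nil
    (fun d => Iff.rfl)
    (by intro p hp; cases hp) (by intro p hp e he; cases hp) List.Forall₂.nil
  rw [show (List.foldl (fun (b c : List (Nat × Nat)) =>
      if List.length b < List.length c then c else b) [] ([] : List (List (Nat × Nat))))
      = (PySem.Set.empty : PySem.Set (Nat × Nat)) from rfl] at hlg
  rw [hlg]
  cases hcase : (((List.range Hn).flatMap (fun y => (List.range Wn).map (fun x => (x, y)))).foldl
      (fun (st : PySem.Set (Nat × Nat) × List (PySem.Set (Nat × Nat))) p =>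
        if cellAt floor p.1 p.2 && !(PySem.Set.contains st.1 p) then
          let comp := satLoop floor Wn Hn (Wn * Hn + 1) (PySem.Set.ofList [p])
          (PySem.Set.union st.1 comp, st.2 ++ [comp])
        else st) (PySem.Set.empty, [])).2 with
  | nil =>
    rw [hcase] at hF2
    rcases List.forall₂_nil_right_iff.mp hF2 with rfl
    simp
  | cons b bs =>
    rw [hcase] at hF2
    obtain ⟨a, as, hab, hFtail, rfl⟩ := List.forall₂_cons_right_iff.mp hF2
    have hpicka : (a :: as).foldl (fun m c => if m.length < c.length then c else m) []
        = as.foldl (fun m c => if m.length < c.length then c else m) a := by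
      simp only [List.foldl_cons]
      rw [if_pos]
      simp only [List.length_nil]
      exact List.length_pos_iff.mpr hab.2.2.1
    rw [hpicka, max?_cons]
    have hbest := pick_parallel as bs a b hFtail hab
    rw [if_neg hbest.2.2.1, if_neg (by simp), Option.getD_some]
    apply List.map_congr_left
    intro y _
    apply List.map_congr_left
    intro x _
    exact contains_congr hbest.2.2.2 (x, y)

-- ===== VERDICT (by name: the statement is the Claim_ definition above) =====
theorem wall_off_unreachable_spec : Claim_equal_wall_off_unreachable := by
  intro floor _ _
  unfold Spec_wall_off_unreachable
  exact main_eq floor
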